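-- pv_equiv track=rewrite | github.com/Seiya0106/Kyopuro_C | Beginner239re.py | is_lattice_point_with_distance_5
-- ===== SOURCE A (Python) =====
-- def is_lattice_point_with_distance_5(x1, y1, x2, y2):
--     # 距離が5になる相対的な座標のリスト
--     distance_5_offsets = [
--         (2, 1), (2, -1), (-2, 1), (-2, -1),
--         (1, 2), (1, -2), (-1, 2), (-1, -2)
--     ]
--
--     # x1, y1 からの距離が5の点を列挙し、x2, y2 からの距離も確認
--     for dx, dy in distance_5_offsets:
--         nx, ny = x1 + dx, y1 + dy
--         if (nx - x2) ** 2 + (ny - y2) ** 2 == 5: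
--             return "Yes"
--
--     return "No"
-- ===== SOURCE B (Python) =====
-- # B: precompute the set of all two-move displacement vectors once; the function
-- # is then a single set-membership test on (x2-x1, y2-y1).
-- _OFFSETS = [
--     (2, 1), (2, -1), (-2, 1), (-2, -1),
--     (1, 2), (1, -2), (-1, 2), (-1, -2)
-- ]
-- REACHABLE = frozenset((a + c, b + d) for (a, b) in _OFFSETS for (c, d) in _OFFSETS)
--
-- def is_lattice_point_with_distance_5(x1, y1, x2, y2):
--     return "Yes" if (x2 - x1, y2 - y1) in REACHABLE else "No"
-- ===== Notes on version B (the rewrite author's own statement) =====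
-- stated objective: simpler
-- what changed: Replaces the per-offset loop that re-evaluates a squared-distance condition with a module-level precomputed set of all 64 pairwise offset sums, so the function body is one set-membership test on the displacement (x2-x1, y2-y1).
import Mathlib
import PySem

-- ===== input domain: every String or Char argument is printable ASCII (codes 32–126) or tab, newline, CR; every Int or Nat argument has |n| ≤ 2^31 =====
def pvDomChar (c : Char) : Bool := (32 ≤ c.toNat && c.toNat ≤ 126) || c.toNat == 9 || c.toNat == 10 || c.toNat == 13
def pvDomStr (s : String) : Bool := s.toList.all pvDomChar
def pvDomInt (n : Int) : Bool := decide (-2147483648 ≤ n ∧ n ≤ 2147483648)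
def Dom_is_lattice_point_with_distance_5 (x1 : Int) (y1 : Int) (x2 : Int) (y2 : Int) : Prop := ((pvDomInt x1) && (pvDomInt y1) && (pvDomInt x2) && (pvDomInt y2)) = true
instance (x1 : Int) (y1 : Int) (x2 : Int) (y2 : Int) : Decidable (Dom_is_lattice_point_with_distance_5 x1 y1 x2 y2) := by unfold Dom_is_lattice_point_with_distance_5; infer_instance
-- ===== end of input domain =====

-- B replaces A's per-offset scan by one membership test in a precomputed set of
-- all two-move displacement sums (objective: simpler; same asymptotic cost).

-- ===== PORT A =====
-- the literal offset list of A
def pvOffsets : List (Int × Int) :=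
  [(2, 1), (2, -1), (-2, 1), (-2, -1), (1, 2), (1, -2), (-1, 2), (-1, -2)]

-- the 'for dx, dy in distance_5_offsets' loop with its early return
def pvLoopA (x1 y1 x2 y2 : Int) : List (Int × Int) → String
  | [] => "No"
  | (dx, dy) :: rest =>
      let nx := x1 + dx
      let ny := y1 + dy
      if (nx - x2) ^ 2 + (ny - y2) ^ 2 = 5 then "Yes"
      else pvLoopA x1 y1 x2 y2 rest

def is_lattice_point_with_distance_5 (x1 : Int) (y1 : Int) (x2 : Int) (y2 : Int) : String :=
  pvLoopA x1 y1 x2 y2 pvOffsets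

-- ===== PORT B =====
-- REACHABLE = frozenset((a+c, b+d) for (a,b) in _OFFSETS for (c,d) in _OFFSETS)
def pvReachable : PySem.Set (Int × Int) :=
  PySem.Set.ofList
    (pvOffsets.flatMap fun p => pvOffsets.map fun q => (p.1 + q.1, p.2 + q.2))

def is_lattice_point_with_distance_5_alt (x1 : Int) (y1 : Int) (x2 : Int) (y2 : Int) : String :=
  if PySem.Set.contains pvReachable (x2 - x1, y2 - y1) then "Yes" else "No"

-- ===== PRECONDITION & SPEC =====
def Spec_is_lattice_point_with_distance_5 (x1 : Int) (y1 : Int) (x2 : Int) (y2 : Int) (out : String) : Prop := out = is_lattice_point_with_distance_5_alt x1 y1 x2 y2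
instance (x1 : Int) (y1 : Int) (x2 : Int) (y2 : Int) (out : String) : Decidable (Spec_is_lattice_point_with_distance_5 x1 y1 x2 y2 out) := by unfold Spec_is_lattice_point_with_distance_5; infer_instance

-- ===== CLAIM (what is proved, stated in full; the proofs are below) =====
def Claim_equal_is_lattice_point_with_distance_5 : Prop := ∀ (x1 : Int) (y1 : Int) (x2 : Int) (y2 : Int), Dom_is_lattice_point_with_distance_5 x1 y1 x2 y2 → Spec_is_lattice_point_with_distance_5 x1 y1 x2 y2 (is_lattice_point_with_distance_5 x1 y1 x2 y2)

-- ===== LEMMAS AND PROOFS =====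

-- A's loop returns "Yes" exactly when some offset in the list satisfies the condition
theorem pvLoopA_eq (x1 y1 x2 y2 : Int) (l : List (Int × Int)) :
    pvLoopA x1 y1 x2 y2 l =
      if ∃ p ∈ l, (x1 + p.1 - x2) ^ 2 + (y1 + p.2 - y2) ^ 2 = 5 then "Yes" else "No" := by
  induction l with
  | nil => simp [pvLoopA]
  | cons hd tl ih =>
    obtain ⟨dx, dy⟩ := hd
    simp only [pvLoopA, ih]
    by_cases h : (x1 + dx - x2) ^ 2 + (y1 + dy - y2) ^ 2 = 5 <;>
      simp [h] <;> split <;> simp_all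

-- integer solutions of a² + b² = 5 are exactly the 8 offsets
theorem pv_sq5 (a b : Int) : a ^ 2 + b ^ 2 = 5 ↔ (a, b) ∈ pvOffsets := by
  constructor
  · intro h
    have ha1 : -2 ≤ a := by nlinarith
    have ha2 : a ≤ 2 := by nlinarith
    have hb1 : -2 ≤ b := by nlinarith
    have hb2 : b ≤ 2 := by nlinarith
    interval_cases a <;> interval_cases b <;> simp_all [pvOffsets]
  · intro h
    simp [pvOffsets] at h
    rcases h with ⟨h1, h2⟩ | ⟨h1, h2⟩ | ⟨h1, h2⟩ | ⟨h1, h2⟩ | ⟨h1, h2⟩ | ⟨h1, h2⟩ | ⟨h1, h2⟩ | ⟨h1, h2⟩ <;>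
      subst h1 <;> subst h2 <;> norm_num

-- the list of pairwise differences of offsets
def pvDiffs : List (Int × Int) :=
  pvOffsets.flatMap fun p => pvOffsets.map fun q => (p.1 - q.1, p.2 - q.2)

theorem pv_mem_diffs_iff_reachable (v : Int × Int) : v ∈ pvDiffs ↔ v ∈ pvReachable := by
  have h1 : pvDiffs ⊆ (pvOffsets.flatMap fun p => pvOffsets.map fun q => (p.1 + q.1, p.2 + q.2)) := by decide
  have h2 : (pvOffsets.flatMap fun p => pvOffsets.map fun q => (p.1 + q.1, p.2 + q.2)) ⊆ pvDiffs := by decide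
  unfold pvReachable
  rw [PySem.Set.mem_ofList]
  exact ⟨fun h => h1 h, fun h => h2 h⟩

theorem pv_exists_iff (x1 y1 x2 y2 : Int) :
    (∃ p ∈ pvOffsets, (x1 + p.1 - x2) ^ 2 + (y1 + p.2 - y2) ^ 2 = 5) ↔
      (x2 - x1, y2 - y1) ∈ pvDiffs := by
  constructor
  · rintro ⟨⟨dx, dy⟩, hp, hc⟩
    have h5 : (x1 + dx - x2) ^ 2 + (y1 + dy - y2) ^ 2 = 5 := hc
    have := (pv_sq5 _ _).mp h5
    simp only [pvDiffs, List.mem_flatMap, List.mem_map]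
    exact ⟨(dx, dy), hp, (x1 + dx - x2, y1 + dy - y2), this, by
      simp; constructor <;> ring⟩
  · intro h
    simp only [pvDiffs, List.mem_flatMap, List.mem_map] at h
    obtain ⟨p, hp, q, hq, heq⟩ := h
    refine ⟨p, hp, ?_⟩
    obtain ⟨h1, h2⟩ := Prod.mk.inj heq
    have hq5 : q.1 ^ 2 + q.2 ^ 2 = 5 := (pv_sq5 q.1 q.2).mpr (by simpa using hq)
    have e1 : x1 + p.1 - x2 = q.1 := by omega
    have e2 : y1 + p.2 - y2 = q.2 := by omega
    rw [e1, e2]; exact hq5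

-- ===== VERDICT (by name: the statement is the Claim_ definition above) =====
theorem is_lattice_point_with_distance_5_spec : Claim_equal_is_lattice_point_with_distance_5 := by
  intro x1 y1 x2 y2 _
  unfold Spec_is_lattice_point_with_distance_5 is_lattice_point_with_distance_5
    is_lattice_point_with_distance_5_alt
  rw [pvLoopA_eq]
  have key : (∃ p ∈ pvOffsets, (x1 + p.1 - x2) ^ 2 + (y1 + p.2 - y2) ^ 2 = 5) ↔
      PySem.Set.contains pvReachable (x2 - x1, y2 - y1) = true :=
    ((pv_exists_iff x1 y1 x2 y2).trans (pv_mem_diffs_iff_reachable _)).trans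
      (PySem.Set.contains_iff _ _).symm
  by_cases h : PySem.Set.contains pvReachable (x2 - x1, y2 - y1) = true
  · rw [if_pos (key.mpr h), if_pos h]
  · rw [if_neg (fun hx => h (key.mp hx)), if_neg h]
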